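-- pv_equiv track=rewrite | github.com/Xiokraze/Python | Random/WebScraper/Author.py | printNameClue
-- ===== SOURCE A (Python) =====
-- def printNameClue(author):
--     tempName = author.split()
--     fname = tempName[0]
--     lname = tempName[1]
--     nameClue = ""
--     flag = True
--     for char in fname:
--         if (char == fname[0] and flag):
--             nameClue = nameClue + char
--             flag = False
--         else:
--             nameClue = nameClue + "_"
--     nameClue = nameClue + " "
--     flag = True
--     for char in lname:
--         if (char == lname[0] and flag):
--             nameClue = nameClue + char
--             flag = False
--         else:
--             nameClue = nameClue + "_"
--     return nameClue
-- ===== SOURCE B (Python) =====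
-- def printNameClue(author):
--     def mask(token):
--         return token[0] + "_" * (len(token) - 1)
--     parts = author.split()
--     return mask(parts[0]) + " " + mask(parts[1])
-- ===== Notes on version B (the rewrite author's own statement) =====
-- stated objective: simpler
-- what changed: Replaces the two char-by-char accumulator loops with a flag by a closed-form mask: each token's first character followed by len(token)-1 underscores.
import Mathlib
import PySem

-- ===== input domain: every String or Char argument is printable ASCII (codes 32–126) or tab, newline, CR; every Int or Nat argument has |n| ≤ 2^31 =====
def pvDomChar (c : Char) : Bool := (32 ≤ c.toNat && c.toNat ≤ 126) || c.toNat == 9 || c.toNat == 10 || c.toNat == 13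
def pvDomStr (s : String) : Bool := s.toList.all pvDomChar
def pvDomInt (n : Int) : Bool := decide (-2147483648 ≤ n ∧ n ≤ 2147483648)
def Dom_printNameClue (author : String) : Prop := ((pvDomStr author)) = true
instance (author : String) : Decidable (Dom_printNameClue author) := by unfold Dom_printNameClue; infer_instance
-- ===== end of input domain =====

-- B replaces A's two char-by-char flag loops by a closed-form mask from each token's first char and length (objective: simpler).

-- ===== PORT A =====
-- one masking loop of A: for char in name: if char == name[0] and flag: append char, flag = False; else: append '_'
def pvLoopA (name : String) (acc : List Char) : List Char × Bool :=
  name.toList.foldl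
    (fun (st : List Char × Bool) char =>
      if (PySem.Str.pyGet? name 0 == some char && st.2) then (st.1 ++ [char], false)
      else (st.1 ++ ['_'], st.2))
    (acc, true)

def printNameClue (author : String) : String :=
  -- tempName = author.split(); fname = tempName[0]; lname = tempName[1]
  match PySem.List.pyGet? (PySem.Str.split₀ author) 0, PySem.List.pyGet? (PySem.Str.split₀ author) 1 with
  | some fname, some lname =>
      -- nameClue = "" ; first loop ; + " " ; second loop
      String.ofList (pvLoopA lname ((pvLoopA fname []).1 ++ [' '])).1
  | _, _ => ""  -- tempName[0] / tempName[1] raises IndexError; excluded by Pre_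

-- ===== PORT B =====
-- mask(token) = first char followed by len(token)-1 underscores
def pvMask (token : String) : String :=
  match token.toList with
  | [] => ""  -- token[0] would raise IndexError; unreachable: split() never yields empty tokens
  | c :: rest => String.ofList (c :: List.replicate rest.length '_')

def printNameClue_alt (author : String) : String :=
  -- parts = author.split(); mask(parts[0]) + " " + mask(parts[1]); none = IndexError, excluded by Pre_
  (((PySem.List.pyGet? (PySem.Str.split₀ author) 0).bind fun f =>
    (PySem.List.pyGet? (PySem.Str.split₀ author) 1).map fun l =>
      pvMask f ++ " " ++ pvMask l)).getD ""  

-- ===== PRECONDITION & SPEC =====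
-- A raises IndexError when author has fewer than two whitespace-separated tokens
def Pre_printNameClue (author : String) : Prop := 2 ≤ (PySem.Str.split₀ author).length
instance (author : String) : Decidable (Pre_printNameClue author) := by unfold Pre_printNameClue; infer_instance
def pvWitness_printNameClue : String := "John Smith"

def Spec_printNameClue (author : String) (out : String) : Prop := out = printNameClue_alt author
instance (author : String) (out : String) : Decidable (Spec_printNameClue author out) := by unfold Spec_printNameClue; infer_instance

-- ===== CLAIM (what is proved, stated in full; the proofs are below) =====
def Claim_equal_printNameClue : Prop := ∀ (author : String), Dom_printNameClue author → Pre_printNameClue author → Spec_printNameClue author (printNameClue author)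

-- ===== LEMMAS AND PROOFS =====

-- once the flag is false every remaining char appends '_'
theorem pvLoopA_flag_false (p : Option Char) (l acc : List Char) :
    l.foldl
      (fun (st : List Char × Bool) char =>
        if (p == some char && st.2) then (st.1 ++ [char], false)
        else (st.1 ++ ['_'], st.2))
      (acc, false)
    = (acc ++ List.replicate l.length '_', false) := by
  induction l generalizing acc with
  | nil => simp
  | cons c rest ih =>
      simp only [List.foldl_cons, Bool.and_false, Bool.false_eq_true, if_false]
      rw [ih]
      simp [List.replicate_succ, List.append_assoc]

-- A's loop on a nonempty token returns first char + underscores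
theorem pvLoopA_eq (name : String) (acc : List Char) (c : Char) (rest : List Char)
    (h : name.toList = c :: rest) :
    pvLoopA name acc = (acc ++ c :: List.replicate rest.length '_', false) := by
  unfold pvLoopA
  have h0 : PySem.Str.pyGet? name 0 = some c := by
    have hg := PySem.Str.pyGet?_natCast name 0
    simp only [Int.natCast_zero] at hg
    rw [hg, h]; simp
  rw [h]
  simp only [h0, List.foldl_cons, beq_self_eq_true, Bool.and_true, if_true]
  rw [pvLoopA_flag_false (some c)]
  simp

-- tokens produced by split() are nonempty: the go-loop invariant
theorem pv_split_go_ne (s cur : List Char) (acc : List (List Char))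
    (hacc : ∀ t ∈ acc, t ≠ []) :
    ∀ t ∈ PySem.Chars.split₀.go s cur acc, t ≠ [] := by
  induction s generalizing cur acc with
  | nil =>
      intro t ht
      rw [PySem.Chars.split₀.go] at ht
      split at ht
      · exact hacc t (List.mem_reverse.mp ht)
      · rename_i hne
        rcases List.mem_cons.mp (List.mem_reverse.mp ht) with h | h
        · subst h
          simpa [List.isEmpty_iff] using hne
        · exact hacc t h
  | cons c rest ih =>
      intro t ht
      rw [PySem.Chars.split₀.go] at ht
      split at ht
      · split at ht
        · exact ih [] acc hacc t ht
        · rename_i hne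
          refine ih [] (cur.reverse :: acc) ?_ t ht
          intro u hu
          rcases List.mem_cons.mp hu with h | h
          · subst h
            simpa [List.isEmpty_iff] using hne
          · exact hacc u h
      · exact ih (c :: cur) acc hacc t ht

theorem pv_split_token_ne (author : String) (t : String)
    (h : t ∈ PySem.Str.split₀ author) : t.toList ≠ [] := by
  unfold PySem.Str.split₀ at h
  rcases List.mem_map.mp h with ⟨w, hw, rfl⟩
  have := pv_split_go_ne author.toList [] [] (by simp) w hw
  simpa using this

-- ===== VERDICT (by name: the statement is the Claim_ definition above) =====
theorem printNameClue_spec : Claim_equal_printNameClue := by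
  intro author _ hpre
  unfold Spec_printNameClue printNameClue printNameClue_alt
  unfold Pre_printNameClue at hpre
  obtain ⟨fname, hf⟩ : ∃ f, PySem.List.pyGet? (PySem.Str.split₀ author) 0 = some f := by
    rw [show (0 : Int) = ((0 : Nat) : Int) by simp, PySem.List.pyGet?_natCast]
    exact ⟨_, List.getElem?_eq_getElem (by omega)⟩
  obtain ⟨lname, hl⟩ : ∃ l, PySem.List.pyGet? (PySem.Str.split₀ author) 1 = some l := by
    rw [show (1 : Int) = ((1 : Nat) : Int) by simp, PySem.List.pyGet?_natCast]
    exact ⟨_, List.getElem?_eq_getElem (by omega)⟩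
  have hfm : fname ∈ PySem.Str.split₀ author := PySem.List.mem_of_pyGet?_eq_some _ hf
  have hlm : lname ∈ PySem.Str.split₀ author := PySem.List.mem_of_pyGet?_eq_some _ hl
  obtain ⟨cf, rf, hcf⟩ : ∃ c r, fname.toList = c :: r := by
    cases hft : fname.toList with
    | nil => exact absurd hft (pv_split_token_ne author fname hfm)
    | cons c r => exact ⟨c, r, rfl⟩
  obtain ⟨cl, rl, hcl⟩ : ∃ c r, lname.toList = c :: r := by
    cases hlt : lname.toList with
    | nil => exact absurd hlt (pv_split_token_ne author lname hlm)
    | cons c r => exact ⟨c, r, rfl⟩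
  rw [hf, hl]
  simp only [Option.bind_some, Option.map_some, Option.getD_some,
    pvLoopA_eq fname [] cf rf hcf, pvLoopA_eq lname _ cl rl hcl,
    pvMask, hcf, hcl]
  apply String.ext
  simp [List.append_assoc]
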